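-- pv_equiv track=rewrite | github.com/ThamizhiniyanCS/AdventOfCode2024 | with_python/with_python/Day 14: Restroom Redoubt.py | part_2
-- ===== SOURCE A (Python) =====
-- def calculate_position(width, height, position, velocity, seconds):
--     x = (position[0] + (velocity[0] * seconds)) % width
--     y = (position[1] + (velocity[1] * seconds)) % height
--
--     return (x, y)
--
-- def calculate_saftey_score(positions, x_middle, y_middle):
--     quadrant_1 = 0
--     quadrant_2 = 0
--     quadrant_3 = 0
--     quadrant_4 = 0
--
--     for x, y in positions:
--         if x != x_middle and y != y_middle:
--             if x < x_middle and y < y_middle: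
--                 quadrant_1 += 1
--             if x > x_middle and y < y_middle:
--                 quadrant_2 += 1
--             if x < x_middle and y > y_middle:
--                 quadrant_3 += 1
--             if x > x_middle and y > y_middle:
--                 quadrant_4 += 1
--
--     return quadrant_1 * quadrant_2 * quadrant_3 * quadrant_4
--
-- def part_2(robots_list, width, height, x_middle, y_middle):
--     safety_scores = []
--
--     for i in range(width * height):
--         positions = []
--
--         for position, velocity in robots_list:
--             positions.append(calculate_position(width, height, position, velocity, i))
--
--         safety_scores.append(calculate_saftey_score(positions, x_middle, y_middle))
--
--     return safety_scores.index(min(safety_scores))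
-- ===== SOURCE B (Python) =====
-- def part_2(robots_list, width, height, x_middle, y_middle):
--     # Precompute, for each x-phase, the SET of robot indices left/right of the
--     # vertical middle, and for each y-phase the set above/below the horizontal
--     # middle; each phase's safety score is then a product of four
--     # set-intersection sizes, so the per-phase loop over robots disappears.
--     robots = list(enumerate(robots_list))
--     left = [{r for r, ((px, _), (vx, _)) in robots
--              if (px + vx * ix) % width < x_middle} for ix in range(width)]
--     right = [{r for r, ((px, _), (vx, _)) in robots
--               if (px + vx * ix) % width > x_middle} for ix in range(width)]
--     top = [{r for r, ((_, py), (_, vy)) in robots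
--             if (py + vy * iy) % height < y_middle} for iy in range(height)]
--     bottom = [{r for r, ((_, py), (_, vy)) in robots
--                if (py + vy * iy) % height > y_middle} for iy in range(height)]
--     scores = [len(left[i % width] & top[i % height])
--               * len(right[i % width] & top[i % height])
--               * len(left[i % width] & bottom[i % height])
--               * len(right[i % width] & bottom[i % height])
--               for i in range(width * height)]
--     return scores.index(min(scores))
-- ===== Notes on version B (the rewrite author's own statement) =====
-- stated objective: faster
-- what changed: B precomputes, for every x-phase and y-phase, the set of robot indices lying left/right of the vertical middle and above/below the horizontal middle, so each phase's safety score is a product of four set-intersection sizes instead of a fresh loop over all robots recomputing every position with multiplications and modulos.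
-- outside the precondition, e.g. on part_2([((0, 0), (0, 0))], -1, -1, 0, 0): A returns 0, B raises IndexError
import Mathlib
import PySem

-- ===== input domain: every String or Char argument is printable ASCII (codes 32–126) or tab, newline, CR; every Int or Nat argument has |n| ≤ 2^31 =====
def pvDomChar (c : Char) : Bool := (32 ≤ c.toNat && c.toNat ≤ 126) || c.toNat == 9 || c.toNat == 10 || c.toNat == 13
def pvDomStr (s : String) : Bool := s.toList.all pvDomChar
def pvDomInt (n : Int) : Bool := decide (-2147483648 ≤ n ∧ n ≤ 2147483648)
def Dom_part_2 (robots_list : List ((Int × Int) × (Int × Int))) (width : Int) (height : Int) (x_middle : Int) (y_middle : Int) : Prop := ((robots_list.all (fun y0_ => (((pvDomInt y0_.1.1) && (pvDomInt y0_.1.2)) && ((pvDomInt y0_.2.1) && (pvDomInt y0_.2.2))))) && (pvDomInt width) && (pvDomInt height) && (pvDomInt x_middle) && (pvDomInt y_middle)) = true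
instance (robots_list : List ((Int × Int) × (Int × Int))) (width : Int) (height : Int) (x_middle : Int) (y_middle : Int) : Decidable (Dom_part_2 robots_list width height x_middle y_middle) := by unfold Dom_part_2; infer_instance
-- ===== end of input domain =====

-- B replaces A's per-phase robot scan by precomputed per-phase robot-index sets
-- (left/right of the vertical middle, above/below the horizontal one); each phase's
-- score becomes a product of four set-intersection sizes (no per-phase robot loop).


-- ===== PORT A =====
def calculate_position (width height : Int) (position velocity : Int × Int) (seconds : Int) : Int × Int :=
  (PySem.Int.mod (position.1 + velocity.1 * seconds) width,
   PySem.Int.mod (position.2 + velocity.2 * seconds) height)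

def calculate_saftey_score (positions : List (Int × Int)) (x_middle y_middle : Int) : Int :=
  let q := positions.foldl (fun (q : Int × Int × Int × Int) p =>
    if p.1 ≠ x_middle ∧ p.2 ≠ y_middle then
      ((if p.1 < x_middle ∧ p.2 < y_middle then q.1 + 1 else q.1),
       (if p.1 > x_middle ∧ p.2 < y_middle then q.2.1 + 1 else q.2.1),
       (if p.1 < x_middle ∧ p.2 > y_middle then q.2.2.1 + 1 else q.2.2.1),
       (if p.1 > x_middle ∧ p.2 > y_middle then q.2.2.2 + 1 else q.2.2.2))
    else q) (0, 0, 0, 0)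
  q.1 * q.2.1 * q.2.2.1 * q.2.2.2

def part_2 (robots_list : List ((Int × Int) × (Int × Int))) (width : Int) (height : Int) (x_middle : Int) (y_middle : Int) : Int :=
  let safety_scores := (PySem.List.pyRange 0 (width * height) 1).foldl (fun acc i =>
    let positions := robots_list.foldl (fun ps rv =>
      ps ++ [calculate_position width height rv.1 rv.2 i]) []
    acc ++ [calculate_saftey_score positions x_middle y_middle]) []
  match PySem.List.min? safety_scores (fun s => s) with
  | none => 0            -- Python: min([]) raises ValueError; excluded by Pre_part_2
  | some m =>
    match PySem.List.index? safety_scores m with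
    | none => 0          -- unreachable: m ∈ safety_scores
    | some j => (j : Int)

-- ===== PORT B =====
def part_2_alt (robots_list : List ((Int × Int) × (Int × Int))) (width : Int) (height : Int) (x_middle : Int) (y_middle : Int) : Int :=
  let robots := PySem.List.enumerate robots_list 0
  let left := (PySem.List.pyRange 0 width 1).map (fun ix =>
    PySem.Set.ofList ((robots.filter (fun rv => decide (PySem.Int.mod (rv.2.1.1 + rv.2.2.1 * ix) width < x_middle))).map (fun rv => rv.1)))
  let right := (PySem.List.pyRange 0 width 1).map (fun ix =>
    PySem.Set.ofList ((robots.filter (fun rv => decide (PySem.Int.mod (rv.2.1.1 + rv.2.2.1 * ix) width > x_middle))).map (fun rv => rv.1)))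
  let top := (PySem.List.pyRange 0 height 1).map (fun iy =>
    PySem.Set.ofList ((robots.filter (fun rv => decide (PySem.Int.mod (rv.2.1.2 + rv.2.2.2 * iy) height < y_middle))).map (fun rv => rv.1)))
  let bottom := (PySem.List.pyRange 0 height 1).map (fun iy =>
    PySem.Set.ofList ((robots.filter (fun rv => decide (PySem.Int.mod (rv.2.1.2 + rv.2.2.2 * iy) height > y_middle))).map (fun rv => rv.1)))
  let scores := (PySem.List.pyRange 0 (width * height) 1).map (fun i =>
    let L := PySem.List.pyGetD left (PySem.Int.mod i width) []    -- left[i % width]; in range whenever 0 < width (IndexError otherwise, outside Pre_)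
    let R := PySem.List.pyGetD right (PySem.Int.mod i width) []
    let T := PySem.List.pyGetD top (PySem.Int.mod i height) []
    let B := PySem.List.pyGetD bottom (PySem.Int.mod i height) []
    PySem.Set.len (PySem.Set.inter L T) * PySem.Set.len (PySem.Set.inter R T) *
      PySem.Set.len (PySem.Set.inter L B) * PySem.Set.len (PySem.Set.inter R B))
  match PySem.List.min? scores (fun s => s) with
  | none => 0            -- Python: min([]) raises ValueError; excluded by Pre_part_2
  | some m =>
    match PySem.List.index? scores m with
    | none => 0          -- unreachable: m ∈ scores
    | some j => (j : Int)

-- ===== PRECONDITION & SPEC =====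
-- Pre_ restricts to positive grid dimensions, the function's natural domain: A raises ValueError
-- (min of an empty list) whenever width*height ≤ 0, and on the remaining excluded corner
-- width < 0 ∧ height < 0 A returns a value only through Python's negative-divisor modulus while
-- B's per-phase tables are naturally empty there (B raises IndexError).
def Pre_part_2 (robots_list : List ((Int × Int) × (Int × Int))) (width : Int) (height : Int) (x_middle : Int) (y_middle : Int) : Prop :=
  0 < width ∧ 0 < height
instance (robots_list : List ((Int × Int) × (Int × Int))) (width : Int) (height : Int) (x_middle : Int) (y_middle : Int) : Decidable (Pre_part_2 robots_list width height x_middle y_middle) := by unfold Pre_part_2; infer_instance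
def pvWitness_part_2 : (List ((Int × Int) × (Int × Int))) × Int × Int × Int × Int :=
  ([((0, 1), (2, -1)), ((2, 0), (-1, 1))], 3, 3, 1, 1)

def Spec_part_2 (robots_list : List ((Int × Int) × (Int × Int))) (width : Int) (height : Int) (x_middle : Int) (y_middle : Int) (out : Int) : Prop := out = part_2_alt robots_list width height x_middle y_middle
instance (robots_list : List ((Int × Int) × (Int × Int))) (width : Int) (height : Int) (x_middle : Int) (y_middle : Int) (out : Int) : Decidable (Spec_part_2 robots_list width height x_middle y_middle out) := by unfold Spec_part_2; infer_instance

-- ===== CLAIM (what is proved, stated in full; the proofs are below) =====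
def Claim_equal_part_2 : Prop := ∀ (robots_list : List ((Int × Int) × (Int × Int))) (width : Int) (height : Int) (x_middle : Int) (y_middle : Int), Dom_part_2 robots_list width height x_middle y_middle → Pre_part_2 robots_list width height x_middle y_middle → Spec_part_2 robots_list width height x_middle y_middle (part_2 robots_list width height x_middle y_middle)

-- ===== LEMMAS AND PROOFS =====

-- Per-phase lookup tables are periodic: the table entry at i mod w is the phase-i position.
lemma pvMod_period (p v w i : Int) (hw : 0 < w) :
    PySem.Int.mod (p + v * PySem.Int.mod i w) w = PySem.Int.mod (p + v * i) w := by
  rw [PySem.Int.mod_eq_emod_of_pos hw, PySem.Int.mod_eq_emod_of_pos hw,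
      PySem.Int.mod_eq_emod_of_pos hw]
  have h1 : p + v * (i % w) = (p + v * i) + w * (-(v * (i / w))) := by
    rw [Int.emod_def]; ring
  rw [h1, Int.add_mul_emod_self_left]

-- Enumerated indices are distinct.
lemma pvNodupFst {α : Type} (xs : List α) (s : Int) :
    ((PySem.List.enumerate xs s).map (fun x => x.1)).Nodup := by
  rw [PySem.List.map_fst_enumerate]
  exact PySem.List.nodup_pyRange_one _ _

-- Size of the intersection of two index sets built by filtering the same Nodup-indexed list
-- equals the count of elements satisfying both predicates.
lemma pvInterLen {α : Type} (l : List (Int × α)) (h : (l.map (fun x => x.1)).Nodup)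
    (p q : (Int × α) → Bool) :
    PySem.Set.len (PySem.Set.inter
        (PySem.Set.ofList ((l.filter p).map (fun x => x.1)))
        (PySem.Set.ofList ((l.filter q).map (fun x => x.1))))
      = (l.countP (fun x => p x && q x) : Int) := by
  have hsubp : ((l.filter p).map (fun x => x.1)).Nodup :=
    h.sublist (List.Sublist.map _ (List.filter_sublist (p := p) (l := l)))
  have hsubq : ((l.filter q).map (fun x => x.1)).Nodup :=
    h.sublist (List.Sublist.map _ (List.filter_sublist (p := q) (l := l)))
  rw [PySem.Set.ofList_eq_self_of_nodup _ hsubp, PySem.Set.ofList_eq_self_of_nodup _ hsubq]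
  simp only [PySem.Set.inter, PySem.Set.len]
  rw [List.filter_map, List.length_map, List.filter_filter, ← List.countP_eq_length_filter]
  congr 1
  apply List.countP_congr
  intro x hx
  simp only [Function.comp, Bool.and_eq_true]
  constructor
  · rintro ⟨hc, hp⟩
    have hmem : x.1 ∈ (l.filter q).map (fun x => x.1) := (PySem.Set.contains_iff _ _).mp hc
    obtain ⟨a, ha, hfa⟩ := List.mem_map.mp hmem
    obtain ⟨hal, hq⟩ := List.mem_filter.mp ha
    have : a = x := List.inj_on_of_nodup_map h hal hx hfa
    subst this
    exact ⟨hp, hq⟩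
  · rintro ⟨hp, hq⟩
    refine ⟨(PySem.Set.contains_iff _ _).mpr ?_, hp⟩
    exact List.mem_map.mpr ⟨x, List.mem_filter.mpr ⟨hx, hq⟩, rfl⟩

-- A table built over one full period, looked up at i mod w, evaluates in range.
lemma pvLookup {β : Type} (f : Int → β) (w i : Int) (d : β) (hw : 0 < w) :
    PySem.List.pyGetD ((PySem.List.pyRange 0 w 1).map f) (PySem.Int.mod i w) d
      = f (PySem.Int.mod i w) :=
  PySem.List.pyGetD_map_pyRange_of_nonneg f w _ d (PySem.Int.mod_nonneg i hw) (PySem.Int.mod_lt i hw)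

-- A's safety-score fold computes the four quadrant counts.
lemma pvQuadFold (xm ym : Int) (ps : List (Int × Int)) : ∀ (a b c d : Int),
    ps.foldl (fun (q : Int × Int × Int × Int) p =>
      if p.1 ≠ xm ∧ p.2 ≠ ym then
        ((if p.1 < xm ∧ p.2 < ym then q.1 + 1 else q.1),
         (if p.1 > xm ∧ p.2 < ym then q.2.1 + 1 else q.2.1),
         (if p.1 < xm ∧ p.2 > ym then q.2.2.1 + 1 else q.2.2.1),
         (if p.1 > xm ∧ p.2 > ym then q.2.2.2 + 1 else q.2.2.2))
      else q) (a, b, c, d)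
    = (a + (ps.countP (fun p => decide (p.1 < xm ∧ p.2 < ym)) : Int),
       b + (ps.countP (fun p => decide (p.1 > xm ∧ p.2 < ym)) : Int),
       c + (ps.countP (fun p => decide (p.1 < xm ∧ p.2 > ym)) : Int),
       d + (ps.countP (fun p => decide (p.1 > xm ∧ p.2 > ym)) : Int)) := by
  induction ps with
  | nil => intro a b c d; simp
  | cons hd tl ih =>
    intro a b c d
    rw [List.foldl_cons]
    by_cases h1 : hd.1 ≠ xm ∧ hd.2 ≠ ym
    · rw [if_pos h1, ih]
      simp only [List.countP_cons]
      obtain ⟨hx, hy⟩ := h1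
      refine Prod.ext ?_ (Prod.ext ?_ (Prod.ext ?_ ?_)) <;>
        · simp only [decide_eq_true_eq]
          split_ifs <;> push_cast <;> omega
    · rw [if_neg h1, ih]
      have h1' : hd.1 = xm ∨ hd.2 = ym := by tauto
      simp only [List.countP_cons]
      refine Prod.ext ?_ (Prod.ext ?_ (Prod.ext ?_ ?_)) <;>
        · simp only [decide_eq_true_eq]
          split_ifs <;> push_cast <;> omega

-- Per-phase equality: B's product of intersection sizes equals A's recomputed score.
lemma pvScore_eq (robots_list : List ((Int × Int) × (Int × Int))) (width height x_middle y_middle i : Int)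
    (hw : 0 < width) (hh : 0 < height) (hi : 0 ≤ i) :
    (let robots := PySem.List.enumerate robots_list 0
     let L := PySem.List.pyGetD ((PySem.List.pyRange 0 width 1).map (fun ix =>
       PySem.Set.ofList ((robots.filter (fun rv => decide (PySem.Int.mod (rv.2.1.1 + rv.2.2.1 * ix) width < x_middle))).map (fun rv => rv.1)))) (PySem.Int.mod i width) []
     let R := PySem.List.pyGetD ((PySem.List.pyRange 0 width 1).map (fun ix =>
       PySem.Set.ofList ((robots.filter (fun rv => decide (PySem.Int.mod (rv.2.1.1 + rv.2.2.1 * ix) width > x_middle))).map (fun rv => rv.1)))) (PySem.Int.mod i width) []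
     let T := PySem.List.pyGetD ((PySem.List.pyRange 0 height 1).map (fun iy =>
       PySem.Set.ofList ((robots.filter (fun rv => decide (PySem.Int.mod (rv.2.1.2 + rv.2.2.2 * iy) height < y_middle))).map (fun rv => rv.1)))) (PySem.Int.mod i height) []
     let B := PySem.List.pyGetD ((PySem.List.pyRange 0 height 1).map (fun iy =>
       PySem.Set.ofList ((robots.filter (fun rv => decide (PySem.Int.mod (rv.2.1.2 + rv.2.2.2 * iy) height > y_middle))).map (fun rv => rv.1)))) (PySem.Int.mod i height) []
     PySem.Set.len (PySem.Set.inter L T) * PySem.Set.len (PySem.Set.inter R T) *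
       PySem.Set.len (PySem.Set.inter L B) * PySem.Set.len (PySem.Set.inter R B))
    = calculate_saftey_score
        (robots_list.map (fun rv => calculate_position width height rv.1 rv.2 i))
        x_middle y_middle := by
  have hnod : ((PySem.List.enumerate robots_list 0).map (fun x => x.1)).Nodup :=
    pvNodupFst robots_list 0
  simp only [pvLookup _ width i _ hw, pvLookup _ height i _ hh,
    pvMod_period _ _ _ _ hw, pvMod_period _ _ _ _ hh]
  rw [pvInterLen _ hnod, pvInterLen _ hnod, pvInterLen _ hnod, pvInterLen _ hnod]
  simp only [calculate_saftey_score]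
  rw [pvQuadFold]
  simp only [zero_add]
  have hcnt : ∀ (c1 c2 : Int → Int → Bool),
      List.countP (fun rv => c1 (PySem.Int.mod (rv.2.1.1 + rv.2.2.1 * i) width) x_middle &&
                             c2 (PySem.Int.mod (rv.2.1.2 + rv.2.2.2 * i) height) y_middle)
        (PySem.List.enumerate robots_list 0)
      = List.countP (fun p => c1 p.1 x_middle && c2 p.2 y_middle)
          (robots_list.map (fun rv => calculate_position width height rv.1 rv.2 i)) := by
    intro c1 c2
    conv_rhs => rw [List.countP_map, ← PySem.List.map_snd_enumerate robots_list 0,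
      List.countP_map]
    rfl
  have e1 := hcnt (fun a m => decide (a < m)) (fun a m => decide (a < m))
  have e2 := hcnt (fun a m => decide (a > m)) (fun a m => decide (a < m))
  have e3 := hcnt (fun a m => decide (a < m)) (fun a m => decide (a > m))
  have e4 := hcnt (fun a m => decide (a > m)) (fun a m => decide (a > m))
  simp only [] at e1 e2 e3 e4
  rw [e1, e2, e3, e4]
  simp only [Bool.decide_and]

-- ===== VERDICT (by name: the statement is the Claim_ definition above) =====
theorem part_2_spec : Claim_equal_part_2 := by
  intro robots_list width height x_middle y_middle _ hpre
  obtain ⟨hw, hh⟩ := hpre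
  unfold Spec_part_2 part_2 part_2_alt
  simp only [PySem.List.foldl_append_singleton_eq_map, List.nil_append]
  have hmapeq : (PySem.List.pyRange 0 (width * height) 1).map (fun i =>
      let robots := PySem.List.enumerate robots_list 0
      let L := PySem.List.pyGetD ((PySem.List.pyRange 0 width 1).map (fun ix =>
        PySem.Set.ofList ((robots.filter (fun rv => decide (PySem.Int.mod (rv.2.1.1 + rv.2.2.1 * ix) width < x_middle))).map (fun rv => rv.1)))) (PySem.Int.mod i width) []
      let R := PySem.List.pyGetD ((PySem.List.pyRange 0 width 1).map (fun ix =>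
        PySem.Set.ofList ((robots.filter (fun rv => decide (PySem.Int.mod (rv.2.1.1 + rv.2.2.1 * ix) width > x_middle))).map (fun rv => rv.1)))) (PySem.Int.mod i width) []
      let T := PySem.List.pyGetD ((PySem.List.pyRange 0 height 1).map (fun iy =>
        PySem.Set.ofList ((robots.filter (fun rv => decide (PySem.Int.mod (rv.2.1.2 + rv.2.2.2 * iy) height < y_middle))).map (fun rv => rv.1)))) (PySem.Int.mod i height) []
      let B := PySem.List.pyGetD ((PySem.List.pyRange 0 height 1).map (fun iy =>
        PySem.Set.ofList ((robots.filter (fun rv => decide (PySem.Int.mod (rv.2.1.2 + rv.2.2.2 * iy) height > y_middle))).map (fun rv => rv.1)))) (PySem.Int.mod i height) []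
      PySem.Set.len (PySem.Set.inter L T) * PySem.Set.len (PySem.Set.inter R T) *
        PySem.Set.len (PySem.Set.inter L B) * PySem.Set.len (PySem.Set.inter R B))
      = (PySem.List.pyRange 0 (width * height) 1).map (fun i =>
          calculate_saftey_score
            (robots_list.map (fun rv => calculate_position width height rv.1 rv.2 i))
            x_middle y_middle) := by
    apply List.map_congr_left
    intro i hi
    have h0i : (0 : Int) ≤ i := (PySem.List.mem_pyRange_one.mp hi).1
    exact pvScore_eq robots_list width height x_middle y_middle i hw hh h0i
  simp only at hmapeq ⊢
  rw [hmapeq]
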